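-- pv_equiv track=rewrite | github.com/eliottcassidy2000/math | 04-computation/beta2_arcflip_exhaustive_n6.py | flip_arc_bits
-- ===== SOURCE A (Python) =====
-- def flip_arc_bits(bits, i, j, n):
--     idx = 0
--     for a in range(n):
--         for b in range(a+1, n):
--             if a == i and b == j:
--                 return bits ^ (1 << idx)
--             idx += 1
--     return bits
-- ===== SOURCE B (Python) =====
-- def flip_arc_bits(bits, i, j, n):
--     if 0 <= i < j < n:
--         idx = i * (2 * n - i - 1) // 2 + (j - i - 1)
--         return bits ^ (1 << idx)
--     return bits
-- ===== Notes on version B (the rewrite author's own statement) =====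
-- stated objective: faster
-- what changed: Replaced the nested scan over all pairs (a,b) with the closed-form pair index i*(2n-i-1)//2 + (j-i-1) guarded by 0<=i<j<n, so no loop runs at all.
import Mathlib
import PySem

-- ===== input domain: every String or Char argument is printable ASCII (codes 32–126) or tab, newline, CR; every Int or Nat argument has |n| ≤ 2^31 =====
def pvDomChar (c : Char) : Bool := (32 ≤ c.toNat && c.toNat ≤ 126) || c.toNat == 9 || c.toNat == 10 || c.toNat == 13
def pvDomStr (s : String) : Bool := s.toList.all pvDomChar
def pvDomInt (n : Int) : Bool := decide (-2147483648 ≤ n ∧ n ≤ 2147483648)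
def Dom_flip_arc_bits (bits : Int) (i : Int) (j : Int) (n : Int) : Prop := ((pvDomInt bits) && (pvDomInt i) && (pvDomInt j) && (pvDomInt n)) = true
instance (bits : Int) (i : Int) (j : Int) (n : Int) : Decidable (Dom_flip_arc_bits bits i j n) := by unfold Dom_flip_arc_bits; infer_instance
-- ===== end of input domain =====

-- B replaces A's quadratic scan over all pairs with the closed-form pair index
-- i*(2n-i-1)//2 + (j-i-1) guarded by 0 ≤ i < j < n (objective: faster, O(1) vs O(n^2)).

-- ===== PORT A =====
-- inner 'for b in range(a+1, n)' loop: returns (some result, idx) on early return, (none, final idx) otherwise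
def flipInner (bits i j a : Int) (bs : List Int) (idx : Int) : Option Int × Int :=
  match bs with
  | [] => (none, idx)
  | b :: rest =>
      if a = i ∧ b = j then (some (PySem.Int.bxor bits (1 <<< idx)), idx)
      else flipInner bits i j a rest (idx + 1)

-- outer 'for a in range(n)' loop, threading idx through the inner loop
def flipOuter (bits i j n : Int) (as_ : List Int) (idx : Int) : Option Int × Int :=
  match as_ with
  | [] => (none, idx)
  | a :: rest =>
      match flipInner bits i j a (PySem.List.pyRange (a + 1) n 1) idx with
      | (some r, idx') => (some r, idx')
      | (none, idx') => flipOuter bits i j n rest idx'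

def flip_arc_bits (bits : Int) (i : Int) (j : Int) (n : Int) : Int :=
  ((flipOuter bits i j n (PySem.List.pyRange 0 n 1) 0).1).getD bits

-- ===== PORT B =====
def flip_arc_bits_alt (bits : Int) (i : Int) (j : Int) (n : Int) : Int :=
  if 0 ≤ i ∧ i < j ∧ j < n then
    PySem.Int.bxor bits ((1 <<< (PySem.Int.floordiv (i * (2 * n - i - 1)) 2 + (j - i - 1))))
  else bits

-- ===== PRECONDITION & SPEC =====
def Spec_flip_arc_bits (bits : Int) (i : Int) (j : Int) (n : Int) (out : Int) : Prop := out = flip_arc_bits_alt bits i j n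
instance (bits : Int) (i : Int) (j : Int) (n : Int) (out : Int) : Decidable (Spec_flip_arc_bits bits i j n out) := by unfold Spec_flip_arc_bits; infer_instance

-- ===== CLAIM (what is proved, stated in full; the proofs are below) =====
def Claim_equal_flip_arc_bits : Prop := ∀ (bits : Int) (i : Int) (j : Int) (n : Int), Dom_flip_arc_bits bits i j n → Spec_flip_arc_bits bits i j n (flip_arc_bits bits i j n)

-- ===== LEMMAS AND PROOFS =====

-- number of pairs (a,b) with s ≤ a < i, a < b < n, i.e. Σ_{a=s}^{i-1} (n-1-a)
def triAux (n : Int) : Int → Nat → Int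
  | _, 0 => 0
  | s, Nat.succ k => (n - 1 - s) + triAux n (s + 1) k

def tri (n s i : Int) : Int := triAux n s (i - s).toNat

theorem tri_self (n s : Int) : tri n s s = 0 := by
  unfold tri; simp [triAux]

theorem tri_step (n s i : Int) (h : s < i) : tri n s i = (n - 1 - s) + tri n (s + 1) i := by
  unfold tri
  have hk : (i - s).toNat = (i - (s + 1)).toNat + 1 := by omega
  rw [hk]; rfl

theorem two_tri (n : Int) : ∀ (k : Nat) (s i : Int), i - s = k → 2 * tri n s i = (i - s) * (2 * n - 1 - s - i) := by
  intro k
  induction k with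
  | zero =>
      intro s i h
      have : i = s := by omega
      subst this
      rw [tri_self]; ring
  | succ m ih =>
      intro s i h
      have hs : s < i := by omega
      rw [tri_step n s i hs, mul_add, ih (s + 1) i (by omega)]
      ring

theorem inner_spec (bits i j a : Int) : ∀ (k : Nat) (s n idx : Int), (n - s).toNat = k →
    flipInner bits i j a (PySem.List.pyRange s n 1) idx =
      if a = i ∧ s ≤ j ∧ j < n then (some (PySem.Int.bxor bits (1 <<< (idx + (j - s)))), idx + (j - s))
      else (none, idx + max 0 (n - s)) := by
  intro k
  induction k with
  | zero =>
      intro s n idx hk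
      rw [PySem.List.pyRange_one_eq_nil (by omega)]
      unfold flipInner
      split_ifs with h
      · exfalso; omega
      · have : max 0 (n - s) = 0 := by omega
        rw [this, add_zero]
  | succ m ih =>
      intro s n idx hk
      rw [PySem.List.pyRange_one_cons (by omega)]
      unfold flipInner
      by_cases hc : a = i ∧ s = j
      · rw [if_pos hc]
        have hcond : a = i ∧ s ≤ j ∧ j < n := ⟨hc.1, by omega, by omega⟩
        rw [if_pos hcond]
        have hz : idx + (j - s) = idx := by omega
        rw [hz]
      · rw [if_neg hc, ih (s + 1) n (idx + 1) (by omega)]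
        split_ifs with h1 h2 h2
        · have he : idx + 1 + (j - (s + 1)) = idx + (j - s) := by omega
          rw [he]
        · exfalso; omega
        · exfalso
          -- a = i ∧ s ≤ j < n but not a = i ∧ s+1 ≤ j < n forces j = s, contradicting hc
          have : a = i ∧ s = j := ⟨h2.1, by omega⟩
          exact hc this
        · have he : idx + 1 + max 0 (n - (s + 1)) = idx + max 0 (n - s) := by omega
          rw [he]

theorem outer_spec (bits i j : Int) : ∀ (k : Nat) (s n idx : Int), (n - s).toNat = k →
    (flipOuter bits i j n (PySem.List.pyRange s n 1) idx).1 =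
      if s ≤ i ∧ i < j ∧ j < n then some (PySem.Int.bxor bits (1 <<< (idx + tri n s i + (j - i - 1))))
      else none := by
  intro k
  induction k with
  | zero =>
      intro s n idx hk
      rw [PySem.List.pyRange_one_eq_nil (by omega)]
      unfold flipOuter
      rw [if_neg (by omega)]
  | succ m ih =>
      intro s n idx hk
      rw [PySem.List.pyRange_one_cons (by omega)]
      unfold flipOuter
      rw [inner_spec bits i j s (n - (s + 1)).toNat (s + 1) n idx rfl]
      by_cases hc : s = i ∧ s + 1 ≤ j ∧ j < n
      · rw [if_pos hc]
        obtain ⟨hsi, hj1, hj2⟩ := hc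
        subst hsi
        rw [if_pos ⟨le_refl s, by omega, hj2⟩, tri_self]
        have he : idx + (j - (s + 1)) = idx + 0 + (j - s - 1) := by omega
        rw [he]
      · rw [if_neg hc]
        have hred : ((match ((none : Option Int), idx + max 0 (n - (s + 1))) with
            | (some r, idx') => (some r, idx')
            | (none, idx') => flipOuter bits i j n (PySem.List.pyRange (s + 1) n 1) idx') : Option Int × Int)
          = flipOuter bits i j n (PySem.List.pyRange (s + 1) n 1) (idx + max 0 (n - (s + 1))) := rfl
        rw [hred, ih (s + 1) n (idx + max 0 (n - (s + 1))) (by omega)]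
        by_cases h1 : s + 1 ≤ i ∧ i < j ∧ j < n
        · rw [if_pos h1, if_pos ⟨by omega, h1.2⟩]
          have ht := tri_step n s i (by omega)
          have hm : max 0 (n - (s + 1)) = n - 1 - s := by omega
          have he : idx + max 0 (n - (s + 1)) + tri n (s + 1) i + (j - i - 1)
              = idx + tri n s i + (j - i - 1) := by rw [ht, hm]; ring
          rw [he]
        · -- s ≤ i < j < n together with ¬hc and ¬h1 is impossible, so both sides are `none`
          have hno : ¬(s ≤ i ∧ i < j ∧ j < n) := by
            intro h2
            exact absurd (⟨by omega, by omega, h2.2.2⟩ : s = i ∧ s + 1 ≤ j ∧ j < n) hc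
          rw [if_neg h1, if_neg hno]

theorem floordiv_two_tri (n i : Int) (h : 0 ≤ i) :
    PySem.Int.floordiv (i * (2 * n - i - 1)) 2 = tri n 0 i := by
  have h2 : i * (2 * n - i - 1) = 2 * tri n 0 i := by
    rw [two_tri n i.toNat 0 i (by omega)]; ring
  rw [h2, PySem.Int.floordiv_eq_ediv_of_pos (by norm_num)]
  omega

-- ===== VERDICT (by name: the statement is the Claim_ definition above) =====
theorem flip_arc_bits_spec : Claim_equal_flip_arc_bits := by
  intro bits i j n _
  unfold Spec_flip_arc_bits flip_arc_bits flip_arc_bits_alt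
  rw [outer_spec bits i j (n - 0).toNat 0 n 0 rfl]
  by_cases h : 0 ≤ i ∧ i < j ∧ j < n
  · rw [if_pos h, if_pos h, Option.getD_some, floordiv_two_tri n i h.1, zero_add]
  · rw [if_neg h, if_neg h, Option.getD_none]
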